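-- pv_equiv track=rewrite | github.com/Agro-Sync/Analizador-Lexico | analisador_lexico_pi.py | analisar_linha
-- ===== SOURCE A (Python) =====
-- dicionario_sentimentos = {
--     "positivo": [
--         "chuva", "regular", "ideal", "favorável", "úmido", "equilibrado",
--         "estável", "satisfatório", "bom", "ótimo", "produtivo",
--         "abundante", "crescimento", "floração", "desenvolvimento", "rendimento",
--         "colheita", "plantio", "precoce", "resiliente"
--     ],
--
--     "negativo": [
--         "seca", "estiagem", "geada", "granizo", "alagamento", "enchente",
--         "excesso", "escassez", "praga", "doença", "baixo", "fraco", "morte",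
--         "perda", "queda", "estresse", "tóxico", "insuficiente", "calor",
--         "frost", "impacto", "danificado", "atraso"
--     ],
--
--     "neutro": [
--         "temperatura", "umidade", "vento", "sol", "chuvisco", "nevoeiro",
--         "plantação", "grãos", "campo", "lavoura", "clima", "nuvem",
--         "cultivo", "milho", "soja", "trigo", "produtor", "região",
--         "estação", "previsão", "monitoramento", "meteorologia"
--     ]
-- }
--
-- def analisar_linha(linha):
--     palavras = linha.lower().split()
--     positivas = sum(1 for palavra in palavras if palavra in dicionario_sentimentos["positivo"])
--     negativas = sum(1 for palavra in palavras if palavra in dicionario_sentimentos["negativo"])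
--     neutras   = sum(1 for palavra in palavras if palavra in dicionario_sentimentos["neutro"])
--
--     if positivas > max(negativas, neutras):
--         return 'Positivo'
--     elif negativas > max(positivas, neutras):
--         return 'Negativo'
--     elif neutras > max(positivas, negativas):
--         return 'Neutro'
--     else:
--         return 'Desconhecido'
-- ===== SOURCE B (Python) =====
-- dicionario_sentimentos = {
--     "positivo": [
--         "chuva", "regular", "ideal", "favorável", "úmido", "equilibrado",
--         "estável", "satisfatório", "bom", "ótimo", "produtivo",
--         "abundante", "crescimento", "floração", "desenvolvimento", "rendimento",
--         "colheita", "plantio", "precoce", "resiliente"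
--     ],
--
--     "negativo": [
--         "seca", "estiagem", "geada", "granizo", "alagamento", "enchente",
--         "excesso", "escassez", "praga", "doença", "baixo", "fraco", "morte",
--         "perda", "queda", "estresse", "tóxico", "insuficiente", "calor",
--         "frost", "impacto", "danificado", "atraso"
--     ],
--
--     "neutro": [
--         "temperatura", "umidade", "vento", "sol", "chuvisco", "nevoeiro",
--         "plantação", "grãos", "campo", "lavoura", "clima", "nuvem",
--         "cultivo", "milho", "soja", "trigo", "produtor", "região",
--         "estação", "previsão", "monitoramento", "meteorologia"
--     ]
-- }
--
-- # reverse index built once: word -> category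
-- _categoria = {palavra: cat
--               for cat, lista in dicionario_sentimentos.items()
--               for palavra in lista}
--
-- def analisar_linha(linha):
--     positivas = negativas = neutras = 0
--     for palavra in linha.lower().split():
--         cat = _categoria.get(palavra)
--         if cat == "positivo":
--             positivas += 1
--         elif cat == "negativo":
--             negativas += 1
--         elif cat == "neutro":
--             neutras += 1
--
--     if positivas > max(negativas, neutras):
--         return 'Positivo'
--     elif negativas > max(positivas, neutras):
--         return 'Negativo'
--     elif neutras > max(positivas, negativas):
--         return 'Neutro'
--     else:
--         return 'Desconhecido'
-- ===== Notes on version B (the rewrite author's own statement) =====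
-- stated objective: simpler
-- what changed: A scans all three whole category lists for every word (three separate membership passes over the word list); B builds one reverse-lookup dict word->category at module load and classifies each word with a single dict lookup in one counting pass.
import Mathlib
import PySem

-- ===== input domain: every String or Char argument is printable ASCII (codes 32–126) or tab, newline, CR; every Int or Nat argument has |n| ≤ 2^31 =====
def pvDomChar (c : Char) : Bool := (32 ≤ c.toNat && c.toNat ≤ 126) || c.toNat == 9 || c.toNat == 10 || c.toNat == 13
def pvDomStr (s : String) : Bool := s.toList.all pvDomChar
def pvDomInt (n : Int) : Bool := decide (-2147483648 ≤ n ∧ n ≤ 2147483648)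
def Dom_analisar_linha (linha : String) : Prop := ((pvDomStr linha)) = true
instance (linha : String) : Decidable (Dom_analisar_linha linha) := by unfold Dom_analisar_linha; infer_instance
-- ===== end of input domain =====

-- B replaces A's three whole-list membership scans per word by one reverse index
-- (word -> category) built once, and a single counting pass over the words (objective: simpler).

-- ===== PORT A =====
def pvPositivo : List String :=
  ["chuva", "regular", "ideal", "favorável", "úmido", "equilibrado",
   "estável", "satisfatório", "bom", "ótimo", "produtivo",
   "abundante", "crescimento", "floração", "desenvolvimento", "rendimento",
   "colheita", "plantio", "precoce", "resiliente"]

def pvNegativo : List String :=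
  ["seca", "estiagem", "geada", "granizo", "alagamento", "enchente",
   "excesso", "escassez", "praga", "doença", "baixo", "fraco", "morte",
   "perda", "queda", "estresse", "tóxico", "insuficiente", "calor",
   "frost", "impacto", "danificado", "atraso"]

def pvNeutro : List String :=
  ["temperatura", "umidade", "vento", "sol", "chuvisco", "nevoeiro",
   "plantação", "grãos", "campo", "lavoura", "clima", "nuvem",
   "cultivo", "milho", "soja", "trigo", "produtor", "região",
   "estação", "previsão", "monitoramento", "meteorologia"]

def dicionario_sentimentos : PySem.Dict String (List String) :=
  PySem.Dict.ofList [("positivo", pvPositivo), ("negativo", pvNegativo), ("neutro", pvNeutro)]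

def analisar_linha (linha : String) : String :=
  let palavras := PySem.Str.split₀ (PySem.Str.lower linha)
  let positivas : Int := palavras.foldl
    (fun acc palavra => if (dicionario_sentimentos.getD "positivo" []).contains palavra then acc + 1 else acc) 0
  let negativas : Int := palavras.foldl
    (fun acc palavra => if (dicionario_sentimentos.getD "negativo" []).contains palavra then acc + 1 else acc) 0
  let neutras : Int := palavras.foldl
    (fun acc palavra => if (dicionario_sentimentos.getD "neutro" []).contains palavra then acc + 1 else acc) 0
  if positivas > max negativas neutras then "Positivo"
  else if negativas > max positivas neutras then "Negativo"
  else if neutras > max positivas negativas then "Neutro"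
  else "Desconhecido"

-- ===== PORT B =====
-- the reverse index {palavra: cat for cat, lista in dicionario_sentimentos.items() for palavra in lista}
def pvCategoria : PySem.Dict String String :=
  PySem.Dict.ofList
    (pvPositivo.map (fun p => (p, "positivo")) ++
     pvNegativo.map (fun p => (p, "negativo")) ++
     pvNeutro.map (fun p => (p, "neutro")))

def analisar_linha_alt (linha : String) : String :=
  let palavras := PySem.Str.split₀ (PySem.Str.lower linha)
  let cnt : Int × Int × Int := palavras.foldl
    (fun acc palavra =>
      let cat := pvCategoria.get? palavra
      if cat = some "positivo" then (acc.1 + 1, acc.2.1, acc.2.2)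
      else if cat = some "negativo" then (acc.1, acc.2.1 + 1, acc.2.2)
      else if cat = some "neutro" then (acc.1, acc.2.1, acc.2.2 + 1)
      else acc) (0, 0, 0)
  if cnt.1 > max cnt.2.1 cnt.2.2 then "Positivo"
  else if cnt.2.1 > max cnt.1 cnt.2.2 then "Negativo"
  else if cnt.2.2 > max cnt.1 cnt.2.1 then "Neutro"
  else "Desconhecido"

-- ===== PRECONDITION & SPEC =====
def Spec_analisar_linha (linha : String) (out : String) : Prop := out = analisar_linha_alt linha
instance (linha : String) (out : String) : Decidable (Spec_analisar_linha linha out) := by unfold Spec_analisar_linha; infer_instance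

-- ===== CLAIM (what is proved, stated in full; the proofs are below) =====
def Claim_equal_analisar_linha : Prop := ∀ (linha : String), Dom_analisar_linha linha → Spec_analisar_linha linha (analisar_linha linha)

-- ===== LEMMAS AND PROOFS =====

theorem pv_dic_pos : dicionario_sentimentos.getD "positivo" [] = pvPositivo := by decide
theorem pv_dic_neg : dicionario_sentimentos.getD "negativo" [] = pvNegativo := by decide
theorem pv_dic_neu : dicionario_sentimentos.getD "neutro" [] = pvNeutro := by decide

-- the reverse index is the plain concatenated association list (all keys fresh)
set_option maxRecDepth 8192 in
theorem pv_cat_mk : pvCategoria = PySem.Dict.mk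
    (pvPositivo.map (fun p => (p, "positivo")) ++
     pvNegativo.map (fun p => (p, "negativo")) ++
     pvNeutro.map (fun p => (p, "neutro"))) := by decide

theorem pv_lookup_map (l : List String) (c w : String) :
    (PySem.Dict.mk (l.map (fun p => (p, c)))).get? w =
      if w ∈ l then some c else none := by
  induction l with
  | nil => rfl
  | cons x xs ih =>
    by_cases h : x = w
    · subst h; simp [PySem.Dict.get?_mk_cons]
    · simp [PySem.Dict.get?_mk_cons, h, ih, (show w ≠ x from fun hh => h hh.symm)]

theorem pv_lookup_append (l1 l2 : List (String × String)) (w : String) :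
    (PySem.Dict.mk (l1 ++ l2)).get? w =
      ((PySem.Dict.mk l1).get? w).or ((PySem.Dict.mk l2).get? w) := by
  induction l1 with
  | nil => rfl
  | cons x xs ih =>
    obtain ⟨k, v⟩ := x
    simp only [List.cons_append, PySem.Dict.get?_mk_cons, ih]
    by_cases h : (k == w) = true <;> simp [h, Option.or]

theorem pv_cat_get (w : String) :
    pvCategoria.get? w =
      if w ∈ pvPositivo then some "positivo"
      else if w ∈ pvNegativo then some "negativo"
      else if w ∈ pvNeutro then some "neutro"
      else none := by
  rw [pv_cat_mk, pv_lookup_append, pv_lookup_append, pv_lookup_map, pv_lookup_map, pv_lookup_map]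
  by_cases h1 : w ∈ pvPositivo <;> by_cases h2 : w ∈ pvNegativo <;>
    by_cases h3 : w ∈ pvNeutro <;> simp [h1, h2, h3]

theorem pv_disj_pn : ∀ w ∈ pvPositivo, w ∉ pvNegativo := by decide
theorem pv_disj_pu : ∀ w ∈ pvPositivo, w ∉ pvNeutro := by decide
theorem pv_disj_nu : ∀ w ∈ pvNegativo, w ∉ pvNeutro := by decide

theorem pv_loop (ws : List String) (a b c : Int) :
    ws.foldl
      (fun acc palavra =>
        let cat := pvCategoria.get? palavra
        if cat = some "positivo" then (acc.1 + 1, acc.2.1, acc.2.2)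
        else if cat = some "negativo" then (acc.1, acc.2.1 + 1, acc.2.2)
        else if cat = some "neutro" then (acc.1, acc.2.1, acc.2.2 + 1)
        else acc) ((a, b, c) : Int × Int × Int) =
    (ws.foldl (fun acc p => if pvPositivo.contains p then acc + 1 else acc) a,
     ws.foldl (fun acc p => if pvNegativo.contains p then acc + 1 else acc) b,
     ws.foldl (fun acc p => if pvNeutro.contains p then acc + 1 else acc) c) := by
  induction ws generalizing a b c with
  | nil => rfl
  | cons w ws ih =>
    simp only [List.foldl_cons, pv_cat_get w]
    by_cases h1 : w ∈ pvPositivo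
    · simp [h1, pv_disj_pn w h1, pv_disj_pu w h1, ih]
    · by_cases h2 : w ∈ pvNegativo
      · simp [h1, h2, pv_disj_nu w h2, ih]
      · by_cases h3 : w ∈ pvNeutro
        · simp [h1, h2, h3, ih]
        · simp [h1, h2, h3, ih]

-- ===== VERDICT (by name: the statement is the Claim_ definition above) =====
theorem analisar_linha_spec : Claim_equal_analisar_linha := by
  intro linha _
  unfold Spec_analisar_linha analisar_linha analisar_linha_alt
  simp only [pv_dic_pos, pv_dic_neg, pv_dic_neu, pv_loop]
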